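-- pv_equiv track=rewrite | github.com/havana-jaehoon/nex | agent/src/command/data_io.py | convIndexToPath
-- ===== SOURCE A (Python) =====
-- DATA_BLOCK_SIZE = 100
--
-- DATA_FILE_COUNT = 10
--
-- def convIndexToPath(index: int):
--     """
--     인덱스를 기반으로 계층적 디렉토리 경로와 파일 이름을 계산합니다.
--     - 각 데이터 파일은 DATA_BLOCK_SIZE(100)개의 레코드를 저장합니다.
--     - 각 디렉토리는 DATA_FILE_COUNT(10)개의 데이터 파일 또는 하위 디렉토리를 포함합니다.
--     """
--     if not isinstance(index, int) or index < 0: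
--         return None, None
--
--     # 레코드 인덱스를 기반으로 파일 인덱스를 계산합니다.
--     # 예: 인덱스 0-99 -> file_index 0; 인덱스 100-199 -> file_index 1
--     file_index = index // DATA_BLOCK_SIZE
--     file_name = f".record_{file_index}"
--
--     # 파일 인덱스를 기반으로 디렉토리 경로를 계산합니다.
--     # 각 디렉토리 레벨은 10개의 항목(파일 또는 하위 디렉토리)을 포함합니다.
--     if file_index < DATA_FILE_COUNT:
--         # 첫 10개 파일(file_index 0-9)은 루트에 위치합니다.
--         dir_path = ''
--     else:
--         path_parts = []
--         temp_index = file_index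
--         while temp_index > 0:
--             part = temp_index % DATA_FILE_COUNT
--             path_parts.append(str(part))
--             temp_index //= DATA_FILE_COUNT
--
--         # 마지막 부분은 파일 이름이므로 경로에서 제외합니다.
--         # 경로는 가장 높은 레벨부터 구성됩니다.
--         dir_path = "/".join(reversed(path_parts[:-1]))
--
--     return dir_path, file_name
-- ===== SOURCE B (Python) =====
-- DATA_BLOCK_SIZE = 100
--
-- DATA_FILE_COUNT = 10
--
-- def convIndexToPath(index: int):
--     # Closed form: the directory path is the decimal digits of file_index
--     # minus its most-significant digit, joined with '/' -- no branch, no loop.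
--     if not isinstance(index, int) or index < 0:
--         return None, None
--     file_index = index // DATA_BLOCK_SIZE
--     return "/".join(str(file_index)[1:]), f".record_{file_index}"
-- ===== Notes on version B (the rewrite author's own statement) =====
-- stated objective: simpler
-- what changed: Replaces A's branch plus digit-extraction while-loop (mod/div, append, reverse, drop last) with a single closed-form expression that joins the decimal string of file_index minus its leading digit with '/'.
import Mathlib
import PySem

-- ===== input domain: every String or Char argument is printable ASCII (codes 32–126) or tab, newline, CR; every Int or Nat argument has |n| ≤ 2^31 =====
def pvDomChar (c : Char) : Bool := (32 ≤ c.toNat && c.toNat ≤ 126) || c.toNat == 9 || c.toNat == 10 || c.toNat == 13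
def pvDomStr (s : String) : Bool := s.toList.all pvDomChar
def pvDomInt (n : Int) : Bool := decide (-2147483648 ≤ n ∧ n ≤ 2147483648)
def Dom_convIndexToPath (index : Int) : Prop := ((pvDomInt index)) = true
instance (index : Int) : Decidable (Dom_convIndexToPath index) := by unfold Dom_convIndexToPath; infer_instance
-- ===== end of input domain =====

-- B replaces A's branch and digit-extraction while-loop with one closed-form
-- join over the decimal string of file_index minus its leading digit (simpler; same cost).


-- ===== PORT A =====
-- the 'while temp_index > 0' loop: appends str(temp_index % 10) and floor-divides by 10
def convLoopA (t : Int) (parts : List String) : List String :=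
  if _h : t > 0 then
    convLoopA (PySem.Int.floordiv t 10) (parts ++ [PySem.Int.toStr (PySem.Int.mod t 10)])
  else parts
termination_by t.toNat
decreasing_by
  rw [PySem.Int.floordiv_eq_ediv_of_pos (show (0:Int) < 10 by omega)]
  omega

def convIndexToPath (index : Int) : Option String × Option String :=
  if index < 0 then (none, none)
  else
    let fileIndex := PySem.Int.floordiv index 100
    -- f".record_{file_index}" : literal ++ str(file_index), built on the list side (exact)
    let fileName := String.ofList (".record_".toList ++ (PySem.Int.toStr fileIndex).toList)
    if fileIndex < 10 then (some "", some fileName)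
    else
      (some (PySem.Str.join "/" ((convLoopA fileIndex []).dropLast.reverse)), some fileName)

-- ===== PORT B =====
def convIndexToPath_alt (index : Int) : Option String × Option String :=
  if index < 0 then (none, none)
  else
    let fileIndex := PySem.Int.floordiv index 100
    -- "/".join(str(fileIndex)[1:]) : iterating a Python string yields its one-char strings;
    -- s[1:] with nonnegative start is List.drop 1 (exact)
    (some (String.ofList (PySem.Chars.join ['/']
        (((PySem.Int.toStr fileIndex).toList.drop 1).map (fun c => [c])))),
     some (String.ofList (".record_".toList ++ (PySem.Int.toStr fileIndex).toList)))

-- ===== PRECONDITION & SPEC =====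
def Spec_convIndexToPath (index : Int) (out : Option String × Option String) : Prop := out = convIndexToPath_alt index
instance (index : Int) (out : Option String × Option String) : Decidable (Spec_convIndexToPath index out) := by unfold Spec_convIndexToPath; infer_instance

-- ===== CLAIM (what is proved, stated in full; the proofs are below) =====
def Claim_equal_convIndexToPath : Prop := ∀ (index : Int), Dom_convIndexToPath index → Spec_convIndexToPath index (convIndexToPath index)

-- ===== LEMMAS AND PROOFS =====

-- toDigitsCore: the accumulator is only appended to
theorem tdcAcc (b : Nat) : ∀ (f n : Nat) (ds : List Char),
    Nat.toDigitsCore b f n ds = Nat.toDigitsCore b f n [] ++ ds := by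
  intro f
  induction f with
  | zero => intro n ds; simp [Nat.toDigitsCore]
  | succ f ih =>
    intro n ds
    simp only [Nat.toDigitsCore]
    by_cases h : n / b = 0
    · simp [h]
    · simp only [h]
      rw [ih (n / b) (Nat.digitChar (n % b) :: ds), ih (n / b) [Nat.digitChar (n % b)]]
      simp

-- toDigitsCore (base 10): any sufficient fuel gives the same digits
theorem tdcFuel : ∀ (n f f' : Nat), n < f → n < f' →
    Nat.toDigitsCore 10 f n [] = Nat.toDigitsCore 10 f' n [] := by
  intro n
  induction n using Nat.strong_induction_on with
  | _ n ih =>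
    intro f f' hf hf'
    match f, f' with
    | f + 1, f' + 1 =>
      simp only [Nat.toDigitsCore]
      by_cases h : n / 10 = 0
      · simp [h]
      · simp only [h]
        rw [tdcAcc 10 f, tdcAcc 10 f']
        have hlt : n / 10 < n := Nat.div_lt_self (by omega) (by omega)
        rw [ih (n / 10) hlt f f' (by omega) (by omega)]

theorem toDigits_ten_lt {m : Nat} (h : m < 10) : Nat.toDigits 10 m = [Nat.digitChar m] := by
  simp [Nat.toDigits, Nat.toDigitsCore, Nat.div_eq_of_lt h, Nat.mod_eq_of_lt h]

theorem toDigits_ten_step {m : Nat} (h : 10 ≤ m) :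
    Nat.toDigits 10 m = Nat.toDigits 10 (m / 10) ++ [Nat.digitChar (m % 10)] := by
  have hne : m / 10 ≠ 0 := by omega
  have hlt : m / 10 < m := Nat.div_lt_self (by omega) (by omega)
  have h1 : Nat.toDigits 10 m = Nat.toDigitsCore 10 m (m / 10) [Nat.digitChar (m % 10)] := by
    simp only [Nat.toDigits, Nat.toDigitsCore, hne]
    simp
  rw [h1, tdcAcc 10 m (m / 10), tdcFuel (m / 10) m (m / 10 + 1) hlt (by omega)]
  rfl

-- str of a single decimal digit, as the loop body computes it
theorem toStr_digit {d : Nat} (h : d < 10) :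
    PySem.Int.toStr (d : Int) = String.ofList [Nat.digitChar d] := by
  simp [PySem.Int.toStr, PySem.Int.toChars, toDigits_ten_lt h,
    (show ¬((d : Int) < 0) by omega)]

-- A's loop produces exactly the decimal digits of m, least-significant first,
-- each as a one-character string
theorem convLoopA_eq (m : Nat) (hm : 0 < m) : ∀ (acc : List String),
    convLoopA (m : Int) acc
      = acc ++ ((Nat.toDigits 10 m).map (fun c => String.ofList [c])).reverse := by
  induction m using Nat.strong_induction_on with
  | _ m ih =>
    intro acc
    rw [convLoopA]
    have hpos : (m : Int) > 0 := by exact_mod_cast hm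
    have hdiv : PySem.Int.floordiv (m : Int) 10 = ((m / 10 : Nat) : Int) := by
      exact_mod_cast PySem.Int.floordiv_natCast m 10
    have hmod : PySem.Int.mod (m : Int) 10 = ((m % 10 : Nat) : Int) := by
      exact_mod_cast PySem.Int.mod_natCast m 10
    simp only [hpos, dif_pos, hdiv, hmod]
    rw [toStr_digit (Nat.mod_lt m (by omega))]
    by_cases h : m < 10
    · have h0 : m / 10 = 0 := Nat.div_eq_of_lt h
      have hmod : m % 10 = m := Nat.mod_eq_of_lt h
      rw [h0, hmod, convLoopA]
      simp [toDigits_ten_lt h]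
    · have hlt : m / 10 < m := Nat.div_lt_self hm (by omega)
      rw [ih (m / 10) hlt (Nat.div_pos (by omega) (by omega)) (acc ++ [String.ofList [Nat.digitChar (m % 10)]])]
      rw [toDigits_ten_step (show 10 ≤ m by omega)]
      simp

-- ===== VERDICT (by name: the statement is the Claim_ definition above) =====
theorem convIndexToPath_spec : Claim_equal_convIndexToPath := by
  intro index _
  unfold Spec_convIndexToPath convIndexToPath convIndexToPath_alt
  by_cases hneg : index < 0
  · simp [hneg]
  · simp only [hneg]
    obtain ⟨n, rfl⟩ : ∃ n : Nat, index = (n : Int) :=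
      ⟨index.toNat, (Int.toNat_of_nonneg (by omega)).symm⟩
    have hdiv : PySem.Int.floordiv (n : Int) 100 = ((n / 100 : Nat) : Int) := by
      exact_mod_cast PySem.Int.floordiv_natCast n 100
    rw [hdiv]
    set m : Nat := n / 100 with hm
    by_cases hlt : (m : Int) < 10
    · have hm10 : m < 10 := by exact_mod_cast hlt
      simp only [hlt]
      rw [toStr_digit hm10]
      simp [PySem.Chars.join]
      rfl
    · have hm10 : 10 ≤ m := by omega
      simp only [hlt]
      refine congrArg₂ Prod.mk ?_ rfl
      refine congrArg some ?_
      have hloop := convLoopA_eq m (by omega) []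
      have hstr : (PySem.Int.toStr (m : Int)).toList = Nat.toDigits 10 m := by
        simp [PySem.Int.toStr, PySem.Int.toChars, (show ¬((m : Int) < 0) by omega)]
      apply String.toList_inj.mp
      rw [PySem.Str.toList_join, hloop, hstr]
      simp only [List.nil_append, List.dropLast_reverse, List.reverse_reverse]
      rw [← List.map_tail]
      have hcomp : (String.toList ∘ fun c : Char => String.ofList [c]) = fun c : Char => [c] := by
        funext c; simp
      simp [hcomp]
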